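-- pv_equiv track=rewrite | github.com/lhj-lhj/SocialRobotics | utils/streamer.py | _pop_ready_clauses
-- ===== SOURCE A (Python) =====
-- from typing import List, Optional, Tuple
--
-- def _pop_ready_clauses(text: str) -> Tuple[List[str], str]:
--     """按句子分割文本"""
--     clauses: List[str] = []
--     start = 0
--     for idx, char in enumerate(text):
--         if char in ".?!":
--             clause = text[start : idx + 1].strip()
--             if clause:
--                 clauses.append(clause)
--             start = idx + 1
--     remainder = text[start:]
--     return clauses, remainder
-- ===== SOURCE B (Python) =====
-- import re
-- from typing import List, Tuple
--
-- def _pop_ready_clauses(text: str) -> Tuple[List[str], str]: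
--     """Split text into completed sentence clauses and an unfinished remainder."""
--     parts = re.split(r'([.?!])', text)  # alternating: piece, delimiter, piece, ..., final piece
--     clauses: List[str] = []
--     for i in range(0, len(parts) - 1, 2):
--         clause = (parts[i] + parts[i + 1]).strip()
--         if clause:
--             clauses.append(clause)
--     return clauses, parts[-1]
-- ===== Notes on version B (the rewrite author's own statement) =====
-- stated objective: idiomatic
-- what changed: Replaces the index/enumerate loop with manual slicing by re.split on a captured delimiter class, pairing each piece with its delimiter to form clauses and taking the final piece as the remainder.
import Mathlib
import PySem

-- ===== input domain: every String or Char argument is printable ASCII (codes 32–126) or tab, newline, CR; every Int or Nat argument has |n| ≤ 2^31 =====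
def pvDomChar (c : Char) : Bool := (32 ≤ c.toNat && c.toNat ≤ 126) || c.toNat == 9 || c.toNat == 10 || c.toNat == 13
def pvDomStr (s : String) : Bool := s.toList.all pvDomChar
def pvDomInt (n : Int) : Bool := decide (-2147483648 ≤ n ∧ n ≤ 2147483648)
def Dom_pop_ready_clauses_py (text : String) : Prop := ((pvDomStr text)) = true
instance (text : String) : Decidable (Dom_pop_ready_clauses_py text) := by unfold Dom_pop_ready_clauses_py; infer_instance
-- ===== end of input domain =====

-- B replaces A's index-tracking enumerate loop with a regex-split decomposition (idiomatic); same return value, proved equal on all of Dom.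

-- the character class ".?!" (shared delimiter test: Python 'char in ".?!"' / regex [.?!])
def pvDelim (c : Char) : Bool := c == '.' || c == '?' || c == '!'

-- ===== PORT A =====
-- strings handled as code-point lists via PySem.Chars (exact on Dom); state = (clauses, start)
def pop_ready_clauses_py (text : String) : List String × String :=
  let cs := text.toList
  let r := (PySem.List.enumerate cs 0).foldl
    (fun (st : List String × Int) p =>
      if pvDelim p.2 then
        let clause := PySem.Chars.strip (PySem.List.slice cs (some st.2) (some (p.1 + 1)))
        ((if clause.isEmpty then st.1 else st.1 ++ [String.ofList clause]), p.1 + 1)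
      else st) ([], (0 : Int))
  (r.1, String.ofList (PySem.List.slice cs (some r.2) none))

-- ===== PORT B =====
-- hand port of re.split(r'([.?!])', text): alternating non-delimiter pieces and single-character
-- delimiter captures (exact for this single-character class)
def pvSplit : List Char → List (List Char)
  | [] => [[]]
  | c :: cs =>
    if pvDelim c then [] :: [c] :: pvSplit cs
    else (c :: (pvSplit cs).headI) :: (pvSplit cs).tail

-- the 'for i in range(0, len(parts)-1, 2)' loop: consume parts two at a time
def pvClauses : List (List Char) → List String
  | p :: d :: rest =>
      let cl := PySem.Chars.strip (p ++ d)
      if cl.isEmpty then pvClauses rest else String.ofList cl :: pvClauses rest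
  | _ => []

def pop_ready_clauses_py_alt (text : String) : List String × String :=
  let parts := pvSplit text.toList
  (pvClauses parts, String.ofList ((PySem.List.pyGet? parts (-1)).getD []))  -- parts[-1]

-- ===== PRECONDITION & SPEC =====
def Spec_pop_ready_clauses_py (text : String) (out : List String × String) : Prop := out = pop_ready_clauses_py_alt text
instance (text : String) (out : List String × String) : Decidable (Spec_pop_ready_clauses_py text out) := by unfold Spec_pop_ready_clauses_py; infer_instance

-- ===== CLAIM (what is proved, stated in full; the proofs are below) =====
def Claim_equal_pop_ready_clauses_py : Prop := ∀ (text : String), Dom_pop_ready_clauses_py text → Spec_pop_ready_clauses_py text (pop_ready_clauses_py text)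

-- ===== LEMMAS AND PROOFS =====

-- reference recursion: clauses / remainder of t given pending (un-delimited) prefix p
def clA (p : List Char) : List Char → List String
  | [] => []
  | c :: t =>
    if pvDelim c then
      (if (PySem.Chars.strip (p ++ [c])).isEmpty then clA [] t
       else String.ofList (PySem.Chars.strip (p ++ [c])) :: clA [] t)
    else clA (p ++ [c]) t

def remA (p : List Char) : List Char → List Char
  | [] => p
  | c :: t => if pvDelim c then remA [] t else remA (p ++ [c]) t

-- a suffix equals the drop at its offset
theorem drop_length_sub_of_suffix {l full : List Char} (h : l <:+ full) :
    full.drop (full.length - l.length) = l := by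
  obtain ⟨pre, rfl⟩ := h
  simp [List.drop_left']

theorem remA_suffix (t : List Char) : ∀ p, remA p t <:+ p ++ t := by
  induction t with
  | nil => intro p; simp [remA]
  | cons c t ih =>
    intro p
    by_cases h : pvDelim c = true
    · simp only [remA, h, if_pos]
      exact (ih []).trans ⟨p ++ [c], by simp⟩
    · simp only [remA, h, if_neg, Bool.not_eq_true]
      simpa using ih (p ++ [c])

-- the key loop characterisation for A's fold
theorem loopA (t : List Char) : ∀ (p full : List Char) (s : Nat) (acc : List String),
    full.drop s = p ++ t →
    s + p.length + t.length = full.length →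
    (PySem.List.enumerate t ((s : Int) + p.length)).foldl
      (fun (st : List String × Int) q =>
        if pvDelim q.2 then
          ((if (PySem.Chars.strip (PySem.List.slice full (some st.2) (some (q.1 + 1)))).isEmpty
            then st.1
            else st.1 ++ [String.ofList (PySem.Chars.strip (PySem.List.slice full (some st.2) (some (q.1 + 1))))]),
           q.1 + 1)
        else st) (acc, (s : Int))
    = (acc ++ clA p t, ((full.length - (remA p t).length : Nat) : Int)) := by
  induction t with
  | nil =>
    intro p full s acc h1 h2
    simp only [PySem.List.enumerate_nil, List.foldl_nil, remA, clA, List.append_nil]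
    have hs : full.length - p.length = s := by
      simp only [List.length_nil, Nat.add_zero] at h2; omega
    rw [hs]
  | cons c t ih =>
    intro p full s acc h1 h2
    rw [PySem.List.enumerate_cons, List.foldl_cons]
    have hfc : p ++ c :: t = (p ++ [c]) ++ t := by simp
    have hslice : PySem.List.slice full (some (s : Int)) (some ((s : Int) + p.length + 1))
        = p ++ [c] := by
      have e : ((s : Int) + p.length + 1) = (s : Int) + ((p.length + 1 : Nat) : Int) := by
        push_cast; ring
      rw [e, PySem.List.slice_natCast_add, h1, hfc,
        List.take_append_of_le_length (by simp)]
      simp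
    by_cases hd : pvDelim c = true
    · simp only [hd, if_pos, hslice]
      have h1' : full.drop (s + p.length + 1) = t := by
        have : s + p.length + 1 = s + (p ++ [c]).length := by simp; omega
        rw [this, ← List.drop_drop, h1, hfc, List.drop_left]
      have h2' : (s + p.length + 1) + ([] : List Char).length + t.length = full.length := by
        simp only [List.length_cons] at h2; simp; omega
      have hrec := ih [] full (s + p.length + 1) (if (PySem.Chars.strip (p ++ [c])).isEmpty
          then acc else acc ++ [String.ofList (PySem.Chars.strip (p ++ [c]))]) h1' h2'
      have ecast : ((s + p.length + 1 : Nat) : Int) = (s : Int) + p.length + 1 := by push_cast; ring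
      rw [ecast] at hrec
      simp only [List.length_nil, Int.natCast_zero, Int.add_zero] at hrec
      rw [hrec]
      simp only [clA, remA, hd, if_pos]
      split_ifs <;> simp
    · simp only [hd, Bool.false_eq_true, if_neg, not_false_iff]
      have h1' : full.drop s = (p ++ [c]) ++ t := by rw [h1, hfc]
      have h2' : s + (p ++ [c]).length + t.length = full.length := by
        simp only [List.length_cons] at h2; simp; omega
      have hrec := ih (p ++ [c]) full s acc h1' h2'
      have ecast : ((s : Int) + ((p ++ [c]).length : Int)) = (s : Int) + p.length + 1 := by
        simp; ring
      rw [ecast] at hrec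
      rw [hrec]
      simp only [clA, remA, hd, Bool.false_eq_true, if_neg, not_false_iff]

theorem pvSplit_eq (t : List Char) : pvSplit t = (pvSplit t).headI :: (pvSplit t).tail := by
  cases t with
  | nil => rfl
  | cons c cs =>
    simp only [pvSplit]
    split_ifs <;> rfl

theorem splitClauses (t : List Char) :
    ∀ p, pvClauses ((p ++ (pvSplit t).headI) :: (pvSplit t).tail) = clA p t := by
  induction t with
  | nil => intro p; rfl
  | cons c cs ih =>
    intro p
    by_cases hd : pvDelim c = true
    · have hrec : pvClauses (pvSplit cs) = clA [] cs := by
        have := ih []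
        rw [pvSplit_eq cs]
        simpa using this
      simp only [pvSplit, hd, if_pos, List.headI, List.tail, pvClauses, clA,
        List.append_nil, hrec]
    · simp only [pvSplit, hd, Bool.false_eq_true, if_neg, not_false_iff,
        List.headI, List.tail, clA]
      have := ih (p ++ [c])
      simpa using this

theorem splitLast (t : List Char) :
    ∀ p, ((p ++ (pvSplit t).headI) :: (pvSplit t).tail).getLast? = some (remA p t) := by
  induction t with
  | nil => intro p; simp [pvSplit, remA]
  | cons c cs ih =>
    intro p
    by_cases hd : pvDelim c = true
    · simp only [pvSplit, hd, if_pos, List.headI, List.tail, remA]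
      rw [List.getLast?_cons_cons]
      have := ih []
      rw [pvSplit_eq cs]
      simpa using this
    · simp only [pvSplit, hd, Bool.false_eq_true, if_neg, not_false_iff,
        List.headI, List.tail, remA]
      have := ih (p ++ [c])
      simpa using this

-- ===== VERDICT (by name: the statement is the Claim_ definition above) =====
theorem pop_ready_clauses_py_spec : Claim_equal_pop_ready_clauses_py := by
  intro text _
  unfold Spec_pop_ready_clauses_py
  simp only [pop_ready_clauses_py, pop_ready_clauses_py_alt]
  set cs := text.toList with hcs
  have hloop := loopA cs [] cs 0 []
    (by simp) (by simp)
  simp only [List.length_nil, Int.natCast_zero, Int.add_zero, List.nil_append] at hloop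
  rw [hloop]
  have hsuf : remA [] cs <:+ cs := by simpa using remA_suffix cs []
  have hdrop : cs.drop (cs.length - (remA [] cs).length) = remA [] cs :=
    drop_length_sub_of_suffix hsuf
  have hcl : pvClauses (pvSplit cs) = clA [] cs := by
    have := splitClauses cs []
    rw [pvSplit_eq cs]
    simpa using this
  have hlast : (pvSplit cs).getLast? = some (remA [] cs) := by
    have := splitLast cs []
    rw [pvSplit_eq cs]
    simpa using this
  rw [PySem.List.slice_from_natCast, hdrop, hcl,
    PySem.List.pyGet?_neg_one, hlast]
  rfl
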